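-- pv_equiv track=rewrite | github.com/yibeichan/te-charnet | src/charnet/community_align.py | assign_scene_ids_from_scene_desc
-- ===== SOURCE A (Python) =====
-- from typing import Optional
--
-- def assign_scene_ids_from_scene_desc(rows: list[dict[str, str]]) -> tuple[list[dict[str, str]], int]:
--     """Assign sequential scene_id values from scene_desc boundary rows.
--
--     Scene rows (scene_desc != "") start a new scene id; subsequent dialogue rows inherit it.
--     If dialogue rows appear before the first scene row, they are backfilled to the first scene id.
--     """
--     scene_id = 0
--     first_scene_id: Optional[int] = None
--     first_scene_row_idx: Optional[int] = None
--
--     for idx, row in enumerate(rows):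
--         if row.get("scene_desc", ""):
--             scene_id += 1
--             row["scene_id"] = str(scene_id)
--             if first_scene_id is None:
--                 first_scene_id = scene_id
--                 first_scene_row_idx = idx
--         else:
--             row["scene_id"] = str(scene_id) if scene_id > 0 else ""
--
--     if first_scene_id is not None and first_scene_row_idx is not None:
--         for idx in range(first_scene_row_idx):
--             if not rows[idx].get("scene_id"):
--                 rows[idx]["scene_id"] = str(first_scene_id)
--
--     return rows, scene_id
-- ===== SOURCE B (Python) =====
-- def assign_scene_ids_from_scene_desc(rows: list[dict[str, str]]) -> tuple[list[dict[str, str]], int]: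
--     """Two staged passes: first compute the running scene count for every row
--     (a prefix scan), then write each row's scene_id from its count -- rows with
--     count 0 (before any scene) get "1" if a scene exists anywhere, else ""."""
--     counts = []
--     c = 0
--     for row in rows:
--         if row.get("scene_desc", ""):
--             c += 1
--         counts.append(c)
--     lead = "1" if c else ""
--     for row, k in zip(rows, counts):
--         row["scene_id"] = str(k) if k else lead
--     return rows, c
-- ===== Notes on version B (the rewrite author's own statement) =====
-- stated objective: alternative
-- what changed: Replaces A's single mutating pass with first-scene bookkeeping plus an index-based backfill rescan by a staged prefix-scan: pass 1 computes each row's running scene count, pass 2 writes every scene_id exactly once from its count (count 0 rows get "1" iff any scene exists), with no backfill.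
import Mathlib
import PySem

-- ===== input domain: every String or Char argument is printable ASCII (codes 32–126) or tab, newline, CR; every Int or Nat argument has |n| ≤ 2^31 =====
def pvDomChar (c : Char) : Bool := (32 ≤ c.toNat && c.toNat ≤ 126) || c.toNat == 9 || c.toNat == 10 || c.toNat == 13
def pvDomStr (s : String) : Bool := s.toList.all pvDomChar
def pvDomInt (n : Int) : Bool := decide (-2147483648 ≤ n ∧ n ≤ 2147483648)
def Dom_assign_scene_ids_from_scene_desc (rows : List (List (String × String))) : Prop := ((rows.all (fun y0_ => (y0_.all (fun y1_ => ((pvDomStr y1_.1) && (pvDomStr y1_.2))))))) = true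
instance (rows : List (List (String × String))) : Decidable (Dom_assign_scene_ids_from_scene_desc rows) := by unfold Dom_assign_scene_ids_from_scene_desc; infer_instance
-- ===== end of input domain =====

-- B replaces A's mutating pass + index-based backfill rescan by a staged prefix-scan (compute all
-- running counts first, then write each scene_id once from its count); objective: alternative.
-- Both Pythons mutate the row dicts in place (B performs the same mutations); the equivalence
-- proved is about the returned (rows, count) value.

-- rows are Python dicts: row.get(k, d) and row[k] = v, via PySem.Dict on the association list
def pvDesc (r : List (String × String)) : String :=
  PySem.Dict.getD (PySem.Dict.mk r) "scene_desc" ""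
def pvIns (r : List (String × String)) (v : String) : List (String × String) :=
  (PySem.Dict.insert (PySem.Dict.mk r) "scene_id" v).items

-- ===== PORT A =====
-- the main `for idx, row in enumerate(rows)` loop, carrying (scene_id, first_scene_id, first_scene_row_idx)
def pvA_loop (rows : List (List (String × String))) (idx scene_id : Int)
    (fsi fsri : Option Int) :
    List (List (String × String)) × Int × Option Int × Option Int :=
  match rows with
  | [] => ([], scene_id, fsi, fsri)
  | row :: rest =>
    if pvDesc row ≠ "" then
      let scene_id' := scene_id + 1
      let row' := pvIns row (PySem.Int.toStr scene_id')
      let fsi' := if fsi = none then some scene_id' else fsi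
      let fsri' := if fsi = none then some idx else fsri
      let r := pvA_loop rest (idx + 1) scene_id' fsi' fsri'
      (row' :: r.1, r.2)
    else
      let row' := pvIns row (if scene_id > 0 then PySem.Int.toStr scene_id else "")
      let r := pvA_loop rest (idx + 1) scene_id fsi fsri
      (row' :: r.1, r.2)

-- `for idx in range(first_scene_row_idx): if not rows[idx].get("scene_id"): rows[idx]["scene_id"] = str(first_scene_id)`
def pvA_backfill (rows : List (List (String × String))) (n fsi : Int) :
    List (List (String × String)) :=
  (PySem.List.pyRange 0 n 1).foldl
    (fun acc idx =>
      let row := PySem.List.pyGetD acc idx []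
      if PySem.Dict.getD (PySem.Dict.mk row) "scene_id" "" = "" then
        PySem.List.pySetD acc idx (pvIns row (PySem.Int.toStr fsi))
      else acc) rows

def assign_scene_ids_from_scene_desc (rows : List (List (String × String))) :
    (List (List (String × String))) × Int :=
  let r := pvA_loop rows 0 0 none none
  match r.2.2.1, r.2.2.2 with
  | some f, some i => (pvA_backfill r.1 i f, r.2.1)
  | _, _ => (r.1, r.2.1)

-- ===== PORT B =====
-- pass 1 of Source B: the running scene count of every row, and the final count
def pvCounts (rows : List (List (String × String))) (c : Int) : List Int × Int :=
  match rows with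
  | [] => ([], c)
  | row :: rest =>
    let c' := if pvDesc row ≠ "" then c + 1 else c
    let r := pvCounts rest c'
    (c' :: r.1, r.2)

def assign_scene_ids_from_scene_desc_alt (rows : List (List (String × String))) :
    (List (List (String × String))) × Int :=
  let p := pvCounts rows 0
  let lead := if p.2 ≠ 0 then "1" else ""
  -- pass 2: `for row, k in zip(rows, counts): row["scene_id"] = str(k) if k else lead`
  ((rows.zip p.1).map (fun q => pvIns q.1 (if q.2 ≠ 0 then PySem.Int.toStr q.2 else lead)), p.2)

-- ===== PRECONDITION & SPEC =====
def Spec_assign_scene_ids_from_scene_desc (rows : List (List (String × String))) (out : (List (List (String × String))) × Int) : Prop := out = assign_scene_ids_from_scene_desc_alt rows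
instance (rows : List (List (String × String))) (out : (List (List (String × String))) × Int) : Decidable (Spec_assign_scene_ids_from_scene_desc rows out) := by unfold Spec_assign_scene_ids_from_scene_desc; infer_instance

-- ===== CLAIM (what is proved, stated in full; the proofs are below) =====
def Claim_equal_assign_scene_ids_from_scene_desc : Prop := ∀ (rows : List (List (String × String))), Dom_assign_scene_ids_from_scene_desc rows → Spec_assign_scene_ids_from_scene_desc rows (assign_scene_ids_from_scene_desc rows)

-- ===== LEMMAS AND PROOFS =====

-- after the first scene row (fsi = some j, scene_id = c > 0), A's loop writes str of exactly the
-- counts B's prefix scan computes from c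
theorem pvA_tail (lead : String) (rows : List (List (String × String))) :
    ∀ (idx c j : Int) (o : Option Int), 0 < c →
    pvA_loop rows idx c (some j) o =
      ((rows.zip (pvCounts rows c).1).map
        (fun q => pvIns q.1 (if q.2 ≠ 0 then PySem.Int.toStr q.2 else lead)),
       (pvCounts rows c).2, some j, o) := by
  induction rows with
  | nil => intro idx c j o hc; rfl
  | cons row rest ih =>
    intro idx c j o hc
    by_cases hd : pvDesc row ≠ ""
    · simp only [pvA_loop, pvCounts, if_pos hd, reduceCtorEq, ite_false, List.zip_cons_cons,
        List.map_cons, if_pos (show c + 1 ≠ 0 by omega)]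
      rw [ih (idx + 1) (c + 1) j o (by omega)]
    · simp only [pvA_loop, pvCounts, if_neg hd, if_pos hc, List.zip_cons_cons,
        List.map_cons, if_pos (show c ≠ 0 by omega)]
      rw [ih (idx + 1) c j o hc]

-- B's final count stays positive
theorem pvCounts_pos (rows : List (List (String × String))) :
    ∀ (c : Int), 0 < c → 0 < (pvCounts rows c).2 := by
  induction rows with
  | nil => intro c hc; exact hc
  | cons row rest ih =>
    intro c hc
    by_cases hd : pvDesc row ≠ ""
    · simp only [pvCounts, if_pos hd]; exact ih (c + 1) (by omega)
    · simp only [pvCounts, if_neg hd]; exact ih c hc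

-- the prefix scan over an all-dialogue prefix yields only zeros
theorem pvCounts_prefix (pre : List (List (String × String)))
    (h : ∀ r ∈ pre, pvDesc r = "") :
    ∀ (rest : List (List (String × String))),
    pvCounts (pre ++ rest) 0 =
      (List.replicate pre.length 0 ++ (pvCounts rest 0).1, (pvCounts rest 0).2) := by
  induction pre with
  | nil => intro rest; simp
  | cons a pre ih =>
    intro rest
    have ha : ¬ pvDesc a ≠ "" := by simpa using h a (by simp)
    simp only [List.cons_append, pvCounts, if_neg ha, List.length_cons,
      List.replicate_succ, List.cons_append]
    rw [ih (fun r hr => h r (by simp [hr])) rest]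

-- zipping a list with a replicate of its own length
theorem pv_zip_replicate {α : Type} (c : Int) :
    ∀ (l : List α), l.zip (List.replicate l.length c) = l.map (fun x => (x, c)) := by
  intro l
  induction l with
  | nil => rfl
  | cons a t ih => simp only [List.length_cons, List.replicate_succ, List.zip_cons_cons,
      List.map_cons, ih]

-- A's loop over an all-dialogue prefix: every row gets scene_id "", state unchanged but idx
theorem pvA_prefix (pre : List (List (String × String)))
    (h : ∀ r ∈ pre, pvDesc r = "") :
    ∀ (rest : List (List (String × String))) (idx : Int),
    pvA_loop (pre ++ rest) idx 0 none none =
      ((pre.map (fun r => pvIns r "")) ++ (pvA_loop rest (idx + pre.length) 0 none none).1,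
       (pvA_loop rest (idx + pre.length) 0 none none).2) := by
  induction pre with
  | nil => intro rest idx; simp
  | cons a pre ih =>
    intro rest idx
    have ha : ¬ pvDesc a ≠ "" := by simpa using h a (by simp)
    simp only [List.cons_append, pvA_loop, if_neg ha, if_neg (show ¬ (0:Int) > 0 by omega),
      List.map_cons, List.cons_append]
    rw [ih (fun r hr => h r (by simp [hr])) rest (idx + 1)]
    have : idx + 1 + (pre.length : Int) = idx + ((a :: pre).length : Int) := by
      simp; omega
    rw [this]

-- rewriting scene_id on a row that already holds scene_id = "" just replaces the value
theorem pvIns_ins (r : List (String × String)) (v w : String) :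
    pvIns (pvIns r v) w = pvIns r w := by
  simp only [pvIns]
  rw [show PySem.Dict.mk (PySem.Dict.insert (PySem.Dict.mk r) "scene_id" v).items
      = PySem.Dict.insert (PySem.Dict.mk r) "scene_id" v from rfl,
    PySem.Dict.insert_insert_self]

theorem pvIns_getD (r : List (String × String)) (v : String) :
    PySem.Dict.getD (PySem.Dict.mk (pvIns r v)) "scene_id" "" = v := by
  simp only [pvIns]
  rw [show PySem.Dict.mk (PySem.Dict.insert (PySem.Dict.mk r) "scene_id" v).items
      = PySem.Dict.insert (PySem.Dict.mk r) "scene_id" v from rfl,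
    PySem.Dict.getD_insert_self]

-- the backfill scan rewrites exactly the prefix rows whose scene_id is ""
theorem pvA_backfill_prefix (f : Int) (pre : List (List (String × String))) :
    ∀ (tail : List (List (String × String))),
    pvA_backfill ((pre.map (fun r => pvIns r "")) ++ tail) pre.length f =
      pre.map (fun r => pvIns r (PySem.Int.toStr f)) ++ tail := by
  induction pre using List.reverseRecOn with
  | nil => intro tail; simp [pvA_backfill, PySem.List.pyRange]
  | append_singleton L x ih =>
    intro tail
    simp only [pvA_backfill] at *
    have hlen : ((L ++ [x]).length : Int) = (L.length : Int) + 1 := by simp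
    rw [hlen, PySem.List.pyRange_one_succ_right (by positivity), List.foldl_append]
    simp only [List.map_append, List.map_cons, List.map_nil, List.append_assoc,
      List.singleton_append]
    rw [ih (pvIns x "" :: tail)]
    have hget : PySem.List.pyGetD
        (L.map (fun r => pvIns r (PySem.Int.toStr f)) ++ pvIns x "" :: tail)
        (L.length : Int) [] = pvIns x "" := by
      simp [pysem]
    simp only [List.foldl_cons, List.foldl_nil, hget, pvIns_getD]
    have hset : PySem.List.pySetD
        (L.map (fun r => pvIns r (PySem.Int.toStr f)) ++ pvIns x "" :: tail)
        (L.length : Int) (pvIns x (PySem.Int.toStr f)) =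
        L.map (fun r => pvIns r (PySem.Int.toStr f)) ++
          pvIns x (PySem.Int.toStr f) :: tail := by
      simp [pysem]
    simp only [if_true, pvIns_ins]
    exact hset

-- splitting rows at the first scene row
theorem pv_split (rows : List (List (String × String)))
    (h : ¬ ∀ r ∈ rows, pvDesc r = "") :
    ∃ pre s post, rows = pre ++ s :: post ∧ (∀ r ∈ pre, pvDesc r = "") ∧ pvDesc s ≠ "" := by
  induction rows with
  | nil => exact absurd (by simp) h
  | cons a rest ih =>
    by_cases ha : pvDesc a = ""
    · have : ¬ ∀ r ∈ rest, pvDesc r = "" := by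
        intro hall; exact h (by simpa [ha] using hall)
      obtain ⟨pre, s, post, h1, h2, h3⟩ := ih this
      exact ⟨a :: pre, s, post, by simp [h1], by simpa [ha] using h2, h3⟩
    · exact ⟨[], a, rest, by simp, by simp, ha⟩

-- the no-scene case: A writes "" everywhere; B's counts are all 0 and lead is ""
theorem pv_no_scene (rows : List (List (String × String)))
    (h : ∀ r ∈ rows, pvDesc r = "") :
    assign_scene_ids_from_scene_desc rows = assign_scene_ids_from_scene_desc_alt rows := by
  have hA := pvA_prefix rows h [] 0
  have hC := pvCounts_prefix rows h []
  simp only [List.append_nil] at hA hC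
  simp only [assign_scene_ids_from_scene_desc, assign_scene_ids_from_scene_desc_alt, hA, hC]
  simp [pvA_loop, pvCounts, pv_zip_replicate]

-- ===== VERDICT (by name: the statement is the Claim_ definition above) =====
theorem assign_scene_ids_from_scene_desc_spec : Claim_equal_assign_scene_ids_from_scene_desc := by
  intro rows _
  unfold Spec_assign_scene_ids_from_scene_desc
  by_cases hall : ∀ r ∈ rows, pvDesc r = ""
  · exact pv_no_scene rows hall
  · obtain ⟨pre, s, post, hrows, hpre, hs⟩ := pv_split rows hall
    subst hrows
    -- evaluate A
    have hA := pvA_prefix pre hpre (s :: post) 0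
    have hAs : pvA_loop (s :: post) (0 + (pre.length : Int)) 0 none none =
        ((pvIns s (PySem.Int.toStr 1)) ::
          ((post.zip (pvCounts post 1).1).map
            (fun q => pvIns q.1 (if q.2 ≠ 0 then PySem.Int.toStr q.2 else "1"))),
         (pvCounts post 1).2, some 1, some (pre.length : Int)) := by
      simp only [pvA_loop, if_pos hs, zero_add, if_true]
      rw [pvA_tail "1" post ((pre.length : Int) + 1) 1 1 (some (pre.length : Int)) (by omega)]
    -- evaluate B's prefix scan
    have hC := pvCounts_prefix pre hpre (s :: post)
    have hCs : pvCounts (s :: post) 0 = (1 :: (pvCounts post 1).1, (pvCounts post 1).2) := by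
      simp only [pvCounts, if_pos hs, zero_add]
    have hcpos : 0 < (pvCounts post 1).2 := pvCounts_pos post 1 (by omega)
    simp only [assign_scene_ids_from_scene_desc, assign_scene_ids_from_scene_desc_alt,
      hA, hAs, hC, hCs]
    -- A: backfill the prefix with str(1)
    rw [pvA_backfill_prefix 1 pre
      ((pvIns s (PySem.Int.toStr 1)) ::
        ((post.zip (pvCounts post 1).1).map
          (fun q => pvIns q.1 (if q.2 ≠ 0 then PySem.Int.toStr q.2 else "1"))))]
    -- B: split the zip at the prefix
    have hzip : (pre ++ s :: post).zip
        (List.replicate pre.length 0 ++ 1 :: (pvCounts post 1).1) =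
        (pre.map (fun x => (x, (0 : Int)))) ++ (s, (1 : Int)) :: post.zip (pvCounts post 1).1 := by
      rw [List.zip_append (by simp), pv_zip_replicate]
      simp
    have hlead : (if (pvCounts post 1).2 ≠ 0 then "1" else "") = "1" := by
      rw [if_pos (by omega)]
    simp only [hzip, hlead, List.map_append, List.map_cons, List.map_map]
    have h1 : PySem.Int.toStr 1 = "1" := rfl
    simp [Function.comp, h1]
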